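-- pv_equiv track=rewrite | github.com/merrycoral/algo | 구현/10798.py | sero
-- ===== SOURCE A (Python) =====
-- def sero(data) :
--     max_length = 0
--     for s in data :
--         if len(s) > max_length:
--             max_length = len(s)
--
--     ans = ''
--     for j in range(max_length):
--         for i in range(len(data)):
--             try:
--                 if data[i][j] != '' :
--                     ans += data[i][j]
--             except:
--                 continue
--
--     return ans
-- ===== SOURCE B (Python) =====
-- def sero(data):
--     # Peel columns off the front: take the first character of every non-empty
--     # row, then drop the first character of every row, until all rows are empty.
--     rows = list(data)
--     out = []
--     while any(rows):
--         out.append(''.join(s[0] for s in rows if s))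
--         rows = [s[1:] for s in rows]
--     return ''.join(out)
-- ===== Notes on version B (the rewrite author's own statement) =====
-- stated objective: simpler
-- what changed: Replaces the max-length scan and the index-based nested try/except loop with a head/tail transposition: repeatedly collect the first character of every non-empty row and drop it, until all rows are empty.
import Mathlib
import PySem

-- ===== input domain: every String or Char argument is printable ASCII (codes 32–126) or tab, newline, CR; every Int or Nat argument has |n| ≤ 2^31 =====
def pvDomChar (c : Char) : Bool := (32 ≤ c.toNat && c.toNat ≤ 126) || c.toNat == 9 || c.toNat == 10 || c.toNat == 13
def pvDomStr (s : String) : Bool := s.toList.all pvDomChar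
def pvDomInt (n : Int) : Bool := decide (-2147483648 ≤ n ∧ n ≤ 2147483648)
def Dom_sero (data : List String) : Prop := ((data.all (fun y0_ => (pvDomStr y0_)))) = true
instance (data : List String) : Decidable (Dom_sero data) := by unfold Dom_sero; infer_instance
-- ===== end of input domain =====

-- B replaces A's max-length scan and index-based nested try/except loop with a
-- head/tail transposition (peel the first column, then recurse on the tails); same cost, simpler.

-- ===== PORT A =====
-- literal transliteration of Source A: max-length scan, then for j in range(max_length),
-- for i in range(len(data)): try data[i][j] (exceptions skipped via the Option matches), append.
-- data[i][j] is a one-character string; its comparison `!= ''` is ported as [c] ≠ [].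
def sero (data : List String) : String :=
  let maxLength : Int :=
    data.foldl (fun m s => if PySem.Str.len s > m then PySem.Str.len s else m) 0
  String.ofList
    ((PySem.List.pyRange 0 maxLength).foldl (fun ans j =>
      (PySem.List.pyRange 0 (data.length : Int)).foldl (fun ans i =>
        match PySem.List.pyGet? data i with
        | none => ans                                  -- except: continue
        | some s =>
          match PySem.Str.pyGet? s j with
          | none => ans                                -- except: continue
          | some c => if [c] ≠ ([] : List Char) then ans ++ [c] else ans) ans) [])

-- ===== PORT B =====
-- termination helper for colsB (cited by decreasing_by)
theorem pvSumTailLt (rows : List (List Char)) (h : rows.any (fun r => !r.isEmpty) = true) :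
    ((rows.map List.tail).map List.length).sum < (rows.map List.length).sum := by
  induction rows with
  | nil => simp at h
  | cons r rs ih =>
    simp only [List.any_cons, Bool.or_eq_true] at h
    have hle : ∀ (l : List (List Char)), ((l.map List.tail).map List.length).sum ≤ (l.map List.length).sum := by
      intro l
      induction l with
      | nil => simp
      | cons a as iha =>
        simp only [List.map_cons, List.sum_cons]
        have : a.tail.length ≤ a.length := by simp [List.length_tail]
        omega
    rcases h with h | h
    · have : r.tail.length < r.length := by
        cases r <;> simp_all
      have := hle rs
      simp only [List.map_cons, List.sum_cons]
      omega
    · have h1 := ih h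
      have h2 : r.tail.length ≤ r.length := by simp [List.length_tail]
      simp only [List.map_cons, List.sum_cons]
      omega

-- while any(rows): collect the first character of every non-empty row, then drop the first characters
def colsB (rows : List (List Char)) : List (List Char) :=
  if rows.any (fun r => !r.isEmpty) = true then
    (rows.filterMap List.head?) :: colsB (rows.map List.tail)
  else []
termination_by (rows.map List.length).sum
decreasing_by simpa using pvSumTailLt rows (by assumption)

def sero_alt (data : List String) : String :=
  String.ofList ((colsB (data.map String.toList)).flatten)

-- ===== PRECONDITION & SPEC =====
def Spec_sero (data : List String) (out : String) : Prop := out = sero_alt data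
instance (data : List String) (out : String) : Decidable (Spec_sero data out) := by unfold Spec_sero; infer_instance

-- ===== CLAIM (what is proved, stated in full; the proofs are below) =====
def Claim_equal_sero : Prop := ∀ (data : List String), Dom_sero data → Spec_sero data (sero data)

-- ===== LEMMAS AND PROOFS =====

-- the maximum row length, as both programs see it
def maxNat (rows : List (List Char)) : Nat :=
  rows.foldl (fun m r => max m r.length) 0

theorem foldl_max_acc (rows : List (List Char)) (c : Nat) :
    rows.foldl (fun m r => max m r.length) c = max c (maxNat rows) := by
  induction rows generalizing c with
  | nil => simp [maxNat]
  | cons r rs ih =>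
    simp only [List.foldl_cons, maxNat] at *
    rw [ih (max c r.length), ih (max 0 r.length)]
    omega

theorem maxNat_zero_iff (rows : List (List Char)) :
    maxNat rows = 0 ↔ rows.any (fun r => !r.isEmpty) = false := by
  induction rows with
  | nil => simp [maxNat]
  | cons r rs ih =>
    simp only [maxNat, List.foldl_cons, List.any_cons]
    rw [foldl_max_acc]
    constructor
    · intro h
      have h1 : r = [] := List.eq_nil_of_length_eq_zero (by omega)
      have h2 := ih.mp (by omega)
      simp [h1, h2]
    · intro h
      simp only [Bool.or_eq_false_iff] at h
      have h2 : maxNat rs = 0 := ih.mpr h.2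
      have h1 : r.length = 0 := by cases r <;> simp_all
      omega

theorem maxNat_tail (rows : List (List Char)) :
    maxNat (rows.map List.tail) = maxNat rows - 1 := by
  suffices H : ∀ (c : Nat), (rows.map List.tail).foldl (fun m r => max m r.length) (c - 1)
      = rows.foldl (fun m r => max m r.length) c - 1 by
    exact H 0
  intro c
  induction rows generalizing c with
  | nil => simp
  | cons r rs ih =>
    simp only [List.map_cons, List.foldl_cons]
    rw [← ih (max c r.length)]
    congr 1
    simp only [List.length_tail]
    omega

-- column shift: column j+1 of the rows is column j of the tails
theorem col_shift (rows : List (List Char)) (j : Nat) :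
    (rows.map List.tail).filterMap (fun r => r[j]?) = rows.filterMap (fun r => r[j+1]?) := by
  induction rows with
  | nil => simp
  | cons r rs ih =>
    have hr : r.tail[j]? = r[j+1]? := by cases r <;> simp
    simp only [List.map_cons, List.filterMap_cons, hr, ih]

-- characterization of B's transposition: column j holds the j-th character of every long-enough row
theorem colsB_eq (n : Nat) (rows : List (List Char)) (h : maxNat rows = n) :
    colsB rows = (List.range n).map (fun j => rows.filterMap (fun r => r[j]?)) := by
  induction n generalizing rows with
  | zero =>
    rw [colsB.eq_def]
    have := (maxNat_zero_iff rows).mp h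
    simp [this]
  | succ n ih =>
    have hany : rows.any (fun r => !r.isEmpty) = true := by
      by_contra hc
      have := (maxNat_zero_iff rows).mpr (by simpa using hc)
      omega
    rw [colsB.eq_def]
    simp only [hany, if_true]
    have ht : maxNat (rows.map List.tail) = n := by rw [maxNat_tail, h]; omega
    rw [ih _ ht, List.range_succ_eq_map]
    simp only [List.map_cons, List.map_map]
    congr 1
    · congr 1; funext l; exact List.head?_eq_getElem?
    · apply List.map_congr_left
      intro j _
      simp only [Function.comp]
      rw [col_shift]

-- append-of-optional-character accumulator loop is filterMap
theorem foldl_opt_append {α : Type} (g : α → Option Char) (xs : List α) (ans : List Char) :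
    xs.foldl (fun a s => match g s with
      | none => a
      | some c => if [c] ≠ ([] : List Char) then a ++ [c] else a) ans
    = ans ++ xs.filterMap g := by
  have hf : (fun (a : List Char) s => match g s with
      | none => a
      | some c => if [c] ≠ ([] : List Char) then a ++ [c] else a)
      = fun a s => match g s with
      | none => a
      | some c => a ++ [c] := by
    funext a s; cases g s <;> simp
  rw [hf]
  induction xs generalizing ans with
  | nil => simp
  | cons x xs ih =>
    simp only [List.foldl_cons, List.filterMap_cons]
    cases g x with
    | none => rw [ih]
    | some c => rw [ih]; simp

-- A's inner loop over range(len(data)) collects column j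
theorem inner_eq (data : List String) (j : Int) (ans : List Char) :
    (PySem.List.pyRange 0 (data.length : Int)).foldl (fun ans i =>
        match PySem.List.pyGet? data i with
        | none => ans
        | some s =>
          match PySem.Str.pyGet? s j with
          | none => ans
          | some c => if [c] ≠ ([] : List Char) then ans ++ [c] else ans) ans
    = ans ++ data.filterMap (fun s => PySem.Str.pyGet? s j) := by
  rw [PySem.List.foldl_congr_mem _ _ (fun ans s =>
        match PySem.Str.pyGet? (PySem.List.pyGetD data s "") j with
        | none => ans
        | some c => if [c] ≠ ([] : List Char) then ans ++ [c] else ans) ans ?_]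
  · rw [PySem.List.foldl_pyRange_zero_pyGetD' data "" (fun ans s =>
        match PySem.Str.pyGet? s j with
        | none => ans
        | some c => if [c] ≠ ([] : List Char) then ans ++ [c] else ans) ans]
    exact foldl_opt_append _ data ans
  · intro acc i hi
    rw [PySem.List.mem_pyRange_one] at hi
    have hget : PySem.List.pyGet? data i = some (PySem.List.pyGetD data i "") := by
      have h1 : i = ((i.toNat : Nat) : Int) := by omega
      rw [h1, PySem.List.pyGet?_natCast, PySem.List.pyGetD_natCast]
      have h2 : i.toNat < data.length := by omega
      simp [List.getElem?_eq_getElem h2, List.getD]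
    rw [hget]

-- A's max-length fold equals maxNat of the char rows
theorem maxlen_eq (data : List String) :
    data.foldl (fun m s => if PySem.Str.len s > m then PySem.Str.len s else m) 0
    = ((maxNat (data.map String.toList) : Nat) : Int) := by
  suffices H : ∀ (c : Nat), data.foldl (fun m s => if PySem.Str.len s > m then PySem.Str.len s else m) ((c : Nat) : Int)
      = (((data.map String.toList).foldl (fun m r => max m r.length) c : Nat) : Int) by
    simpa [maxNat] using H 0
  intro c
  induction data generalizing c with
  | nil => simp
  | cons s ds ih =>
    simp only [List.foldl_cons, List.map_cons]
    have hhead : (if PySem.Str.len s > ((c : Nat) : Int) then PySem.Str.len s else ((c : Nat) : Int))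
        = ((max c s.toList.length : Nat) : Int) := by
      rw [PySem.Str.len_eq]
      split <;> push_cast <;> omega
    rw [hhead, ih]

-- casting the column index through pyRange's Ints
theorem cols_cast (data : List String) (N : Nat) :
    List.flatMap (fun j => data.filterMap fun s => PySem.Str.pyGet? s j) ((List.range N).map (fun k => ((k : Nat) : Int)))
    = ((List.range N).map (fun j => (data.map String.toList).filterMap (fun r => r[j]?))).flatten := by
  rw [List.flatMap_map, ← List.flatMap_def]
  apply List.flatMap_congr
  intro j _
  simp [List.filterMap_map]

-- ===== VERDICT (by name: the statement is the Claim_ definition above) =====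
theorem sero_spec : Claim_equal_sero := by
  intro data _
  unfold Spec_sero
  have hinner : (fun (ans : List Char) (j : Int) =>
      (PySem.List.pyRange 0 (data.length : Int)).foldl (fun ans i =>
        match PySem.List.pyGet? data i with
        | none => ans
        | some s =>
          match PySem.Str.pyGet? s j with
          | none => ans
          | some c => if [c] ≠ ([] : List Char) then ans ++ [c] else ans) ans)
      = fun ans j => ans ++ data.filterMap (fun s => PySem.Str.pyGet? s j) := by
    funext ans j; exact inner_eq data j ans
  show sero data = sero_alt data
  rw [sero, sero_alt]
  rw [maxlen_eq, hinner, colsB_eq (maxNat (data.map String.toList)) _ rfl]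
  rw [PySem.List.foldl_append_eq_flatMap, PySem.List.pyRange_zero_natCast]
  rw [List.nil_append, cols_cast]
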